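-- pv_equiv track=rewrite | github.com/maddwiz/UnifiedStateCodec | archive/legacy/proto/stream_proto_d3_native_v0.py | _reconstruct_from_template
-- ===== SOURCE A (Python) =====
-- from typing import Dict, List, Tuple
--
-- def _reconstruct_from_template(template: str, params: List[str]) -> str:
--     """
--     Reconstruct by interleaving template segments + params.
--     Preserves punctuation/spaces exactly as template.
--     """
--     if "<*>" not in template:
--         return template
--
--     segs = template.split("<*>")
--     out = [segs[0]]
--     for i in range(len(segs) - 1):
--         out.append(params[i] if i < len(params) else "<*>")
--         out.append(segs[i + 1])
--     return "".join(out)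
-- ===== SOURCE B (Python) =====
-- from typing import List
--
--
-- def _reconstruct_from_template(template: str, params: List[str]) -> str:
--     out = []
--     i = 0
--     pos = 0
--     n = len(template)
--     while pos < n:
--         if template.startswith("<*>", pos):
--             out.append(params[i] if i < len(params) else "<*>")
--             i += 1
--             pos += 3
--         else:
--             out.append(template[pos])
--             pos += 1
--     return "".join(out)
-- ===== Notes on version B (the rewrite author's own statement) =====
-- stated objective: alternative
-- what changed: Replaced split-on-placeholder plus segment/param interleaving and rebuild with a single left-to-right scan that emits characters and substitutes each '<*>' occurrence in place using a running parameter counter.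
import Mathlib
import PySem

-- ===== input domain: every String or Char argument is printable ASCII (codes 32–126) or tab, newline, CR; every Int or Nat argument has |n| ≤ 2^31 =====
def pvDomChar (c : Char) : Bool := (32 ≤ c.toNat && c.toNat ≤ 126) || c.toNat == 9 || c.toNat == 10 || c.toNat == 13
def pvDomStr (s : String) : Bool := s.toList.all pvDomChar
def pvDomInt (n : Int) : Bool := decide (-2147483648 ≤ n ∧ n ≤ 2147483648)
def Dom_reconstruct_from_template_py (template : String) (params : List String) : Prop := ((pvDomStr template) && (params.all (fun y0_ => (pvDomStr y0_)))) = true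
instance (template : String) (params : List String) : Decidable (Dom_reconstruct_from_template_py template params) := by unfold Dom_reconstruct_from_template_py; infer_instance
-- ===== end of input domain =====

-- B replaces A's split-on-"<*>" + interleave-and-rejoin with a single left-to-right scan that
-- substitutes each "<*>" occurrence in place (alternative decomposition, same cost).

-- ===== PORT A =====
-- literal port of A: early return when "<*>" is absent, then split, interleave segments with
-- params (falling back to the literal "<*>" when params run out), and join.
-- split? is total here (the separator "<*>" is non-empty) and the segment indices 0 and i+1 are
-- always in range, so .getD only discharges the Option and never supplies a value.
def reconstruct_from_template_py (template : String) (params : List String) : String :=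
  if PySem.Str.isIn "<*>" template = false then template
  else
    let segs : List String := (PySem.Str.split? template "<*>").getD []
    let out : List String := [(PySem.List.pyGet? segs 0).getD ""]
    let out := (PySem.List.pyRange 0 ((segs.length : Int) - 1) 1).foldl
      (fun out i =>
        (out ++ [if i < (params.length : Int) then (PySem.List.pyGet? params i).getD "" else "<*>"])
          ++ [(PySem.List.pyGet? segs (i + 1)).getD ""])
      out
    PySem.Str.join "" out

-- ===== PORT B =====
-- the while loop of Source B over positions pos..n becomes structural recursion on the remaining
-- suffix of the character list; `template.startswith("<*>", pos)` is `isPrefixOf` on that suffix.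
def pvScanB (params : List String) (l : List Char) (i : Nat) : List Char :=
  match l with
  | [] => []
  | c :: rest =>
    if ['<', '*', '>'].isPrefixOf (c :: rest) then
      (if _h : i < params.length then params[i].toList else ['<', '*', '>'])
        ++ pvScanB params ((c :: rest).drop 3) (i + 1)
    else c :: pvScanB params rest i
termination_by l.length
decreasing_by
  · simp [List.drop]
  · simp

def reconstruct_from_template_py_alt (template : String) (params : List String) : String :=
  String.ofList (pvScanB params template.toList 0)

-- ===== PRECONDITION & SPEC =====
def Spec_reconstruct_from_template_py (template : String) (params : List String) (out : String) : Prop := out = reconstruct_from_template_py_alt template params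
instance (template : String) (params : List String) (out : String) : Decidable (Spec_reconstruct_from_template_py template params out) := by unfold Spec_reconstruct_from_template_py; infer_instance

-- ===== CLAIM (what is proved, stated in full; the proofs are below) =====
def Claim_equal_reconstruct_from_template_py : Prop := ∀ (template : String) (params : List String), Dom_reconstruct_from_template_py template params → Spec_reconstruct_from_template_py template params (reconstruct_from_template_py template params)

-- ===== LEMMAS AND PROOFS =====

-- reference form of Chars.splitOn on the separator ['<','*','>']
def pvSp (l : List Char) : List (List Char) :=
  match l with
  | [] => [[]]
  | c :: rest =>
    if ['<', '*', '>'].isPrefixOf (c :: rest) then [] :: pvSp ((c :: rest).drop 3)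
    else
      match pvSp rest with
      | [] => [[c]]
      | x :: xs => (c :: x) :: xs
termination_by l.length
decreasing_by
  · simp [List.drop]
  · simp

def pvMapHead (f : List Char → List Char) : List (List Char) → List (List Char)
  | [] => []
  | x :: xs => f x :: xs

-- the parameter inserted for the i-th placeholder
def pvRep (params : List String) (i : Nat) : List Char :=
  if _h : i < params.length then params[i].toList else ['<', '*', '>']

-- interleaving of split segments with params, as chars
def pvTailA (params : List String) : List (List Char) → Nat → List Char
  | [], _ => []
  | s :: rest, i => pvRep params i ++ s ++ pvTailA params rest (i + 1)

def pvInterA (params : List String) (segs : List (List Char)) (i : Nat) : List Char :=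
  match segs with
  | [] => []
  | s :: rest => s ++ pvTailA params rest i

theorem pvSp_ne_nil (l : List Char) : pvSp l ≠ [] := by
  rw [pvSp.eq_def]
  rcases l with _ | ⟨c, rest⟩ <;> simp
  split
  · simp
  · split <;> simp

theorem pvSp_pos (c : Char) (rest : List Char) (h : ['<', '*', '>'].isPrefixOf (c :: rest) = true) :
    pvSp (c :: rest) = [] :: pvSp ((c :: rest).drop 3) := by
  rw [pvSp.eq_def]
  simp only [h, if_pos]

theorem pvSp_neg (c : Char) (rest : List Char) (h : ¬ ['<', '*', '>'].isPrefixOf (c :: rest) = true) :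
    pvSp (c :: rest) = match pvSp rest with
      | [] => [[c]]
      | x :: xs => (c :: x) :: xs := by
  rw [pvSp.eq_def]
  simp [h]

theorem pvPrefix_len (c : Char) (rest : List Char)
    (h : ['<', '*', '>'].isPrefixOf (c :: rest) = true) : 3 ≤ (c :: rest).length :=
  List.IsPrefix.length_le (List.isPrefixOf_iff_prefix.mp h)

theorem pvSplitOn_go_eq (fuel : Nat) (l cur : List Char) (acc : List (List Char))
    (h : l.length ≤ fuel) :
    PySem.Chars.splitOn.go ['<', '*', '>'] fuel l cur acc
      = acc.reverse ++ pvMapHead (cur.reverse ++ ·) (pvSp l) := by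
  induction fuel generalizing l cur acc with
  | zero =>
    interval_cases hl : l.length
    have hnil : l = [] := List.length_eq_zero_iff.mp hl
    subst hnil
    simp [PySem.Chars.splitOn.go, pvSp, pvMapHead]
  | succ fuel ih =>
    rcases l with _ | ⟨c, rest⟩
    · simp [PySem.Chars.splitOn.go, pvSp, pvMapHead]
    · by_cases hpre : ['<', '*', '>'].isPrefixOf (c :: rest) = true
      · rw [PySem.Chars.splitOn.go, if_pos hpre, pvSp_pos c rest hpre,
          ih _ _ _ (by have := pvPrefix_len c rest hpre; simp at h ⊢; omega)]
        rcases h0 : pvSp ((c :: rest).drop 3) with _ | ⟨x, xs⟩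
        · exact absurd h0 (pvSp_ne_nil _)
        · simp only [List.drop_succ_cons] at h0
          simp [pvMapHead, h0]
      · rw [PySem.Chars.splitOn.go, if_neg hpre, pvSp_neg c rest hpre,
          ih _ _ _ (by simp at h; omega)]
        rcases h0 : pvSp rest with _ | ⟨x, xs⟩
        · exact absurd h0 (pvSp_ne_nil _)
        · simp [pvMapHead]

theorem pvSplitOn_eq (l : List Char) :
    PySem.Chars.splitOn l ['<', '*', '>'] = pvSp l := by
  rw [PySem.Chars.splitOn, pvSplitOn_go_eq _ _ _ _ (by omega)]
  rcases h0 : pvSp l with _ | ⟨x, xs⟩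
  · exact absurd h0 (pvSp_ne_nil _)
  · simp [pvMapHead]

theorem pvScanB_eq_interA (params : List String) (l : List Char) (i : Nat) :
    pvScanB params l i = pvInterA params (pvSp l) i := by
  fun_induction pvScanB params l i with
  | case1 => simp [pvSp, pvInterA, pvTailA]
  | case2 i c rest hpre ih =>
    rw [pvSp_pos c rest hpre]
    rcases h0 : pvSp ((c :: rest).drop 3) with _ | ⟨x, xs⟩
    · exact absurd h0 (pvSp_ne_nil _)
    · simp only [h0] at ih
      simp only [List.drop_succ_cons] at ih
      simp [pvInterA, pvTailA, pvRep, ih]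
  | case3 i c rest hpre ih =>
    rw [pvSp_neg c rest hpre]
    rcases h0 : pvSp rest with _ | ⟨x, xs⟩
    · exact absurd h0 (pvSp_ne_nil _)
    · simp only [h0] at ih
      simp [pvInterA, ih]

theorem pvScanB_no_occ (params : List String) (l : List Char) (i : Nat)
    (h : ¬ ['<', '*', '>'] <:+: l) : pvScanB params l i = l := by
  fun_induction pvScanB params l i with
  | case1 => rfl
  | case2 i c rest hpre ih =>
    exact absurd (List.IsPrefix.isInfix (List.isPrefixOf_iff_prefix.mp hpre)) h
  | case3 i c rest hpre ih =>
    rw [ih (fun hh => h (List.infix_cons hh))]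

theorem pvRep_eq (params : List String) (m : Nat) :
    (if ((m : Nat) : Int) < (params.length : Int)
       then (PySem.List.pyGet? params ((m : Nat) : Int)).getD "" else "<*>").toList
      = pvRep params m := by
  rw [PySem.List.pyGet?_natCast]
  by_cases hm : m < params.length
  · have : ((m : Int) < (params.length : Int)) := by exact_mod_cast hm
    simp [this, hm, pvRep]
  · have : ¬ ((m : Int) < (params.length : Int)) := by exact_mod_cast hm
    simp [this, hm, pvRep]

theorem pvTail_eq (rest params : List String) (i0 : Nat) :
    (List.range rest.length).flatMap
      (fun j => (if ((i0 + j : Nat) : Int) < (params.length : Int)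
                   then (PySem.List.pyGet? params ((i0 + j : Nat) : Int)).getD ""
                   else "<*>").toList
                ++ ((rest[j]?).getD "").toList)
      = pvTailA params (rest.map String.toList) i0 := by
  induction rest generalizing i0 with
  | nil => simp [pvTailA]
  | cons s rest ih =>
    rw [List.length_cons, List.range_succ_eq_map, List.flatMap_cons, List.flatMap_map]
    simp only [List.getElem?_cons_succ, Nat.add_zero,
      List.getElem?_cons_zero, Option.getD_some]
    have h2 : (fun a : Nat =>
        (if ((i0 + a.succ : Nat) : Int) < (params.length : Int)
           then (PySem.List.pyGet? params ((i0 + a.succ : Nat) : Int)).getD "" else "<*>").toList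
          ++ ((rest[a]?).getD "").toList)
      = (fun j : Nat =>
        (if (((i0 + 1) + j : Nat) : Int) < (params.length : Int)
           then (PySem.List.pyGet? params (((i0 + 1) + j : Nat) : Int)).getD "" else "<*>").toList
          ++ ((rest[j]?).getD "").toList) := by
      funext a
      have : i0 + a.succ = (i0 + 1) + a := by omega
      rw [this]
    rw [h2, ih (i0 + 1), pvRep_eq params i0]
    simp [pvTailA, List.append_assoc]

theorem pvFlattenMapFlatMap {α β γ : Type} (f : β → List γ) (g : α → List β) (r : List α) :
    (List.map f (List.flatMap g r)).flatten = List.flatMap (fun a => (List.map f (g a)).flatten) r := by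
  induction r with
  | nil => simp
  | cons a t ih => simp [ih]

theorem pvJoin_nil (L : List (List Char)) : PySem.Chars.join [] L = L.flatten := by
  simp only [PySem.Chars.join, List.intercalate]
  induction L with
  | nil => simp
  | cons x t ih => cases t <;> simp_all [List.intersperse]

theorem pvGet0 (x : String) (xs : List String) : (PySem.List.pyGet? (x :: xs) 0).getD "" = x := by
  simp [PySem.List.pyGet?, PySem.List.pyIdx?]

theorem pvGetSucc (x : String) (xs : List String) (j : Nat) :
    (PySem.List.pyGet? (x :: xs) ((j : Int) + 1)).getD "" = (xs[j]?).getD "" := by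
  have : ((j : Int) + 1) = (((j + 1 : Nat) : Nat) : Int) := by push_cast; ring
  rw [this, PySem.List.pyGet?_natCast]
  simp

theorem pvMain (template : String) (params : List String) :
    reconstruct_from_template_py template params
      = reconstruct_from_template_py_alt template params := by
  rw [reconstruct_from_template_py, reconstruct_from_template_py_alt]
  by_cases hin : PySem.Str.isIn "<*>" template = false
  · rw [if_pos hin]
    have hni : ¬ ['<', '*', '>'] <:+: template.toList := by
      rw [PySem.Str.isIn_eq] at hin
      exact (PySem.Chars.isIn_eq_false_iff _ _).mp hin
    rw [pvScanB_no_occ params _ 0 hni, String.ofList_toList]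
  · rw [if_neg hin]
    -- identify the split
    have hmap := PySem.Str.split?_map template "<*>"
    rw [show ("<*>" : String).toList = ['<', '*', '>'] from rfl] at hmap
    rw [show PySem.Chars.split? template.toList ['<', '*', '>']
          = some (pvSp template.toList) by
        rw [PySem.Chars.split?]
        simp [pvSplitOn_eq]] at hmap
    rcases Option.map_eq_some_iff.mp hmap with ⟨L, hL1, hL2⟩
    rcases L with _ | ⟨s0, rest⟩
    · exact absurd (by simpa using hL2.symm) (pvSp_ne_nil template.toList)
    · rw [hL1]
      simp only [Option.getD_some, List.length_cons]
      rw [pvGet0]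
      have hlen : ((rest.length + 1 : Nat) : Int) - 1 = ((rest.length : Nat) : Int) := by
        push_cast; ring
      rw [hlen, PySem.List.pyRange_of_pos 0 (rest.length : Int) (by norm_num)]
      have hrange : (if (0 : Int) < (rest.length : Int)
            then (((rest.length : Int) - 0 + 1 - 1) / 1).toNat else 0) = rest.length := by
        by_cases h : 0 < rest.length
        · rw [if_pos (by exact_mod_cast h)]; simp
        · have h0 : rest.length = 0 := by omega
          simp [h0]
      rw [hrange]
      -- turn the fold into a flatMap
      simp only [List.append_assoc]
      rw [show (fun (out : List String) (i : Int) =>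
            out ++ ([if i < (params.length : Int)
                       then (PySem.List.pyGet? params i).getD "" else "<*>"]
                    ++ [(PySem.List.pyGet? (s0 :: rest) (i + 1)).getD ""]))
          = (fun (out : List String) (i : Int) =>
            out ++ ((fun i => [if i < (params.length : Int)
                       then (PySem.List.pyGet? params i).getD "" else "<*>",
                     (PySem.List.pyGet? (s0 :: rest) (i + 1)).getD ""]) i)) from rfl]
      rw [PySem.List.foldl_append_eq_flatMap]
      rw [List.flatMap_map]
      -- compare character lists
      apply String.toList_inj.mp
      rw [PySem.Str.toList_join, String.toList_ofList, pvJoin_nil]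
      rw [pvScanB_eq_interA params template.toList 0, ← hL2]
      simp only [List.map_append, List.map_cons, List.map_nil, List.flatten_append,
        List.flatten_cons, List.flatten_nil, pvFlattenMapFlatMap, zero_add, one_mul,
        List.append_nil, pvGetSucc, pvInterA]
      have ht := pvTail_eq rest params 0
      simp only [Nat.zero_add] at ht
      rw [← ht, String.toList_ofList]


-- ===== VERDICT (by name: the statement is the Claim_ definition above) =====
theorem reconstruct_from_template_py_spec : Claim_equal_reconstruct_from_template_py := by
  intro template params _
  unfold Spec_reconstruct_from_template_py
  exact pvMain template params
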